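-- pv_equiv track=rewrite | github.com/C-H-P/CPSC217 | CPSC217F21A4-Christina.py | others
-- ===== SOURCE A (Python) =====
-- def others(list, patientZero, potentialZombie):
--     all = []
--     others = []
--
--     for elements in list:
--         all.extend(elements)
--
--     for people in all:
--         if people not in patientZero:
--             if people not in potentialZombie:
--                 if people not in others:
--                     others.append(people)
--
--     others.sort()
--     return others
-- ===== SOURCE B (Python) =====
-- def others(list, patientZero, potentialZombie):
--     excluded = set(patientZero) | set(potentialZombie)
--     out = []
--     for x in sorted(x for sub in list for x in sub):
--         if x not in excluded and (not out or out[-1] != x):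
--             out.append(x)
--     return out
-- ===== Notes on version B (the rewrite author's own statement) =====
-- stated objective: faster
-- what changed: Sort-then-scan: B sorts the flattened multiset once and emits elements in one linear scan, deduplicating by comparison with the last emitted element (adjacency in sorted order) instead of A's quadratic membership/dedup loop followed by a sort.
import Mathlib
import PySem

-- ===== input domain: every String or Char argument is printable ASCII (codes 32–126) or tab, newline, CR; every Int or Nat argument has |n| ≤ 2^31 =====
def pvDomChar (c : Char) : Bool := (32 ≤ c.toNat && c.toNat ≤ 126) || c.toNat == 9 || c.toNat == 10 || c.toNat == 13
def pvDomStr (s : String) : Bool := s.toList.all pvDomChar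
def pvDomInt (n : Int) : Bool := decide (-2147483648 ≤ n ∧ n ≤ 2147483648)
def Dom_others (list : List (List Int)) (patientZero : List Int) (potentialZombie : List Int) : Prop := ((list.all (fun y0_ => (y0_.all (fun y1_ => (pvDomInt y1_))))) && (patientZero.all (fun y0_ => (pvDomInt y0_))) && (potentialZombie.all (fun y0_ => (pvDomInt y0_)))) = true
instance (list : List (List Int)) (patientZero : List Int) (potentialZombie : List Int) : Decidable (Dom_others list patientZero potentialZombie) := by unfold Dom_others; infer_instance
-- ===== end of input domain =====

-- B sorts the flattened multiset once and deduplicates by adjacency in one linear scan (sort-then-scan), replacing A's quadratic membership/dedup loop followed by a sort.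


-- ===== PORT A =====
-- literal transliteration: flatten via extend, then the nested not-in branches with append, then sort
def others (list : List (List Int)) (patientZero : List Int) (potentialZombie : List Int) : List Int :=
  let all := list.foldl (fun a elements => a ++ elements) []
  let oth := all.foldl (fun o people =>
    if people ∉ patientZero then
      if people ∉ potentialZombie then
        if people ∉ o then o ++ [people] else o
      else o
    else o) []
  PySem.List.sorted oth (fun x => x) false

-- ===== PORT B =====
-- literal transliteration of Source B: excluded = set(pz) | set(pq); one scan over the sorted
-- flattened pool, appending x unless excluded or equal to the last appended element
def others_alt (list : List (List Int)) (patientZero : List Int) (potentialZombie : List Int) : List Int :=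
  let excluded := PySem.Set.union (PySem.Set.ofList patientZero) (PySem.Set.ofList potentialZombie)
  (PySem.List.sorted (list.flatMap (fun sub => sub)) (fun x => x) false).foldl
    (fun out x => if x ∉ excluded ∧ (out = [] ∨ out.getLast? ≠ some x) then out ++ [x] else out) []

-- ===== PRECONDITION & SPEC =====
def Spec_others (list : List (List Int)) (patientZero : List Int) (potentialZombie : List Int) (out : List Int) : Prop := out = others_alt list patientZero potentialZombie
instance (list : List (List Int)) (patientZero : List Int) (potentialZombie : List Int) (out : List Int) : Decidable (Spec_others list patientZero potentialZombie out) := by unfold Spec_others; infer_instance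

-- ===== CLAIM =====
def Claim_equal_others : Prop := ∀ (list : List (List Int)) (patientZero : List Int) (potentialZombie : List Int), Dom_others list patientZero potentialZombie → Spec_others list patientZero potentialZombie (others list patientZero potentialZombie)

-- ===== LEMMAS AND PROOFS =====

-- membership in A's dedup/filter loop
theorem othersA_loop_mem (pz pq : List Int) (l acc : List Int) (x : Int) :
    x ∈ l.foldl (fun o people =>
      if people ∉ pz then
        if people ∉ pq then
          if people ∉ o then o ++ [people] else o
        else o
      else o) acc ↔ x ∈ acc ∨ (x ∈ l ∧ x ∉ pz ∧ x ∉ pq) := by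
  induction l generalizing acc with
  | nil => simp
  | cons p t ih =>
    simp only [List.foldl_cons, ih, List.mem_cons]
    split_ifs with h1 h2 h3 <;> by_cases hx : x = p <;> simp_all

-- A's loop keeps its accumulator duplicate-free
theorem othersA_loop_nodup (pz pq : List Int) (l acc : List Int) (h : acc.Nodup) :
    (l.foldl (fun o people =>
      if people ∉ pz then
        if people ∉ pq then
          if people ∉ o then o ++ [people] else o
        else o
      else o) acc).Nodup := by
  induction l generalizing acc with
  | nil => exact h
  | cons p t ih =>
    simp only [List.foldl_cons]
    apply ih
    split_ifs with h1 h2 h3 <;>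
      first
        | exact h
        | exact List.Nodup.append h (List.nodup_singleton p) (by simp_all)

-- membership in A's flattened list
theorem all_mem (list : List (List Int)) (acc : List Int) (x : Int) :
    x ∈ list.foldl (fun a elements => a ++ elements) acc ↔ x ∈ acc ∨ ∃ e ∈ list, x ∈ e := by
  induction list generalizing acc with
  | nil => simp
  | cons e t ih => simp [ih]; tauto

-- in a strictly increasing list the last element bounds every member
theorem le_getLast_of_pairwise_lt (acc : List Int) (h : acc.Pairwise (· < ·)) :
    ∀ a ∈ acc, ∀ m, acc.getLast? = some m → a ≤ m := by
  induction acc with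
  | nil => intro a ha; cases ha
  | cons b t ih =>
    intro a ha m hm
    have h' := (List.pairwise_cons.mp h)
    cases t with
    | nil =>
      simp at ha hm
      omega
    | cons c u =>
      rw [List.getLast?_cons_cons] at hm
      rcases List.mem_cons.mp ha with rfl | hat
      · exact le_of_lt (h'.1 m (List.mem_of_getLast? hm))
      · exact ih h'.2 a hat m hm

-- the scan over a sorted pool: result is strictly increasing, and contains exactly the
-- non-excluded elements of the pool (plus the accumulator)
theorem scan_spec (excl : List Int) (l : List Int) : ∀ (acc : List Int),
    l.Pairwise (· ≤ ·) → acc.Pairwise (· < ·) → (∀ a ∈ acc, ∀ y ∈ l, a ≤ y) →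
    (l.foldl (fun out x => if x ∉ excl ∧ (out = [] ∨ out.getLast? ≠ some x) then out ++ [x] else out) acc).Pairwise (· < ·) ∧
    ∀ x, x ∈ l.foldl (fun out x => if x ∉ excl ∧ (out = [] ∨ out.getLast? ≠ some x) then out ++ [x] else out) acc ↔
      x ∈ acc ∨ (x ∈ l ∧ x ∉ excl) := by
  induction l with
  | nil => intro acc _ hacc _; exact ⟨hacc, by simp⟩
  | cons y t ih =>
    intro acc hl hacc hle
    have hl' := List.pairwise_cons.mp hl
    simp only [List.foldl_cons]
    by_cases hc : y ∉ excl ∧ (acc = [] ∨ acc.getLast? ≠ some y)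
    · rw [if_pos hc]
      have hlt : ∀ a ∈ acc, a < y := by
        intro a ha
        have hley : a ≤ y := hle a ha y (by simp)
        rcases lt_or_eq_of_le hley with h | rfl
        · exact h
        · rcases hc.2 with hnil | hne
          · simp [hnil] at ha
          · have hne' : acc ≠ [] := by rintro rfl; cases ha
            have hm : acc.getLast? = some (acc.getLast hne') := List.getLast?_eq_some_getLast hne'
            have ham := le_getLast_of_pairwise_lt acc hacc a ha _ hm
            have hmy : acc.getLast hne' ≤ a := hle _ (List.mem_of_getLast? hm) a (by simp)
            have heq : acc.getLast hne' = a := le_antisymm hmy ham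
            exact absurd (heq ▸ hm) hne
      have hacc' : (acc ++ [y]).Pairwise (· < ·) := by
        rw [List.pairwise_append]
        exact ⟨hacc, List.pairwise_singleton _ _, by simpa using hlt⟩
      have hle' : ∀ a ∈ acc ++ [y], ∀ z ∈ t, a ≤ z := by
        intro a ha z hz
        rcases List.mem_append.mp ha with ha | ha
        · exact hle a ha z (by simp [hz])
        · simp at ha; subst ha; exact hl'.1 z hz
      obtain ⟨hp, hm⟩ := ih (acc ++ [y]) hl'.2 hacc' hle'
      refine ⟨hp, fun x => ?_⟩
      rw [hm]
      have hy := hc.1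
      simp only [List.mem_append, List.mem_cons, List.not_mem_nil]
      constructor
      · rintro ((h | h) | ⟨h1, h2⟩)
        · exact Or.inl h
        · simp at h; subst h; exact Or.inr ⟨Or.inl rfl, hy⟩
        · exact Or.inr ⟨Or.inr h1, h2⟩
      · rintro (h | ⟨(rfl | h1), h2⟩)
        · exact Or.inl (Or.inl h)
        · exact Or.inl (Or.inr (by simp))
        · exact Or.inr ⟨h1, h2⟩
    · rw [if_neg hc]
      have hle' : ∀ a ∈ acc, ∀ z ∈ t, a ≤ z := fun a ha z hz => hle a ha z (by simp [hz])
      obtain ⟨hp, hm⟩ := ih acc hl'.2 hacc hle'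
      refine ⟨hp, fun x => ?_⟩
      rw [hm]
      -- since the branch was skipped, either y is excluded or y is acc's last element
      have hy : y ∈ excl ∨ y ∈ acc := by
        by_cases hyx : y ∈ excl
        · exact Or.inl hyx
        · right
          by_cases hnil : acc = []
          · exact absurd ⟨hyx, Or.inl hnil⟩ hc
          · by_cases hlast : acc.getLast? = some y
            · exact List.mem_of_getLast? hlast
            · exact absurd ⟨hyx, Or.inr hlast⟩ hc
      simp only [List.mem_cons]
      constructor
      · rintro (h | ⟨h1, h2⟩)
        · exact Or.inl h
        · exact Or.inr ⟨Or.inr h1, h2⟩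
      · rintro (h | ⟨(rfl | h1), h2⟩)
        · exact Or.inl h
        · rcases hy with h' | h'
          · exact absurd h' h2
          · exact Or.inl h'
        · exact Or.inr ⟨h1, h2⟩

-- ===== VERDICT =====
theorem others_spec : Claim_equal_others := by
  intro list pz pq _
  unfold Spec_others others others_alt
  simp only []
  obtain ⟨hp, hm⟩ := scan_spec
    (PySem.Set.union (PySem.Set.ofList pz) (PySem.Set.ofList pq))
    (PySem.List.sorted (list.flatMap (fun sub => sub)) (fun x => x) false)
    [] (by simpa using PySem.List.sorted_pairwise (list.flatMap (fun sub => sub)) (fun x => x))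
    List.Pairwise.nil (by simp)
  refine PySem.List.sorted_id_eq_of_perm_of_pairwise _ _ ?_ (hp.imp le_of_lt)
  apply (List.perm_ext_iff_of_nodup (hp.imp ne_of_lt) (othersA_loop_nodup _ _ _ _ List.nodup_nil)).mpr
  intro x
  rw [hm, othersA_loop_mem]
  simp [PySem.List.mem_sorted, PySem.Set.mem_union, PySem.Set.mem_ofList, all_mem]
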